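-- pv_equiv track=rewrite | github.com/gtvkun/AGMaquinas | AG.py | calcular_reserva
-- ===== SOURCE A (Python) =====
-- NUM_MAQUINAS = 7
--
-- CAPACIDADES = [20, 15, 35, 40, 15, 15, 10]
--
-- INTERVALOS_MANUTENCAO = [2, 2, 1, 1, 1, 1, 1]
--
-- DEMANDAS = [80, 90, 65, 70]
--
-- NUM_INTERVALOS = 4
--
-- def calcular_reserva(cromossomo):
--     # Calcula Reserva de Potência disponível em cada intervalo
--     reservas = []
--     for intervalo in range(NUM_INTERVALOS):
--         demanda = DEMANDAS[intervalo]
--         potencia_disponivel = sum(CAPACIDADES)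
--         for i in range(NUM_MAQUINAS):
--             for k in range(INTERVALOS_MANUTENCAO[i]):
--                 if cromossomo[i] + k == intervalo:
--                     potencia_disponivel -= CAPACIDADES[i]
--         reserva = potencia_disponivel - demanda
--         reservas.append(reserva)
--     return reservas
-- ===== SOURCE B (Python) =====
-- NUM_MAQUINAS = 7
--
-- CAPACIDADES = [20, 15, 35, 40, 15, 15, 10]
--
-- INTERVALOS_MANUTENCAO = [2, 2, 1, 1, 1, 1, 1]
--
-- DEMANDAS = [80, 90, 65, 70]
--
-- NUM_INTERVALOS = 4
--
-- def calcular_reserva(cromossomo):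
--     # Scatter per machine instead of scanning all machines per interval.
--     total = sum(CAPACIDADES)
--     reservas = [total - DEMANDAS[j] for j in range(NUM_INTERVALOS)]
--     for i in range(NUM_MAQUINAS):
--         for k in range(INTERVALOS_MANUTENCAO[i]):
--             interval = cromossomo[i] + k
--             if 0 <= interval < NUM_INTERVALOS:
--                 reservas[interval] -= CAPACIDADES[i]
--     return reservas
-- ===== Notes on version B (the rewrite author's own statement) =====
-- stated objective: alternative
-- what changed: A rebuilds the full machine/maintenance scan (with the total-capacity sum) for every interval (gather); B precomputes the per-interval base reserves once and makes a single pass over the machines, scattering each maintenance outage into the result list.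
import Mathlib
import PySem

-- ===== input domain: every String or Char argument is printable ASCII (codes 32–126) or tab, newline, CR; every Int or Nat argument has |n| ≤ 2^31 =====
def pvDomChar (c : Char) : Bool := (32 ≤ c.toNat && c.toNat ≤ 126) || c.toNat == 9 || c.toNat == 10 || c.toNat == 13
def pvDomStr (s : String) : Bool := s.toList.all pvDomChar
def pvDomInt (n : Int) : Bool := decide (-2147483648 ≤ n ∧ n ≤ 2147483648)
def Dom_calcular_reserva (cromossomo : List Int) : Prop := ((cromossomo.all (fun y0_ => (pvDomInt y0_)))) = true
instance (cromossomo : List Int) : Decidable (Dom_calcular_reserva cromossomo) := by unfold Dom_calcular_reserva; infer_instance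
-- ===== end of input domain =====

-- B replaces A's per-interval scan over all machines (gather) by one pass over the
-- machines that scatters each maintenance outage into a pre-built reserve list (objective: alternative).

def NUM_MAQUINAS : Int := 7
def CAPACIDADES : List Int := [20, 15, 35, 40, 15, 15, 10]
def INTERVALOS_MANUTENCAO : List Int := [2, 2, 1, 1, 1, 1, 1]
def DEMANDAS : List Int := [80, 90, 65, 70]
def NUM_INTERVALOS : Int := 4

-- ===== PORT A =====
def calcular_reserva (cromossomo : List Int) : List Int :=
  (PySem.List.pyRange 0 NUM_INTERVALOS 1).foldl (fun reservas intervalo =>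
    let demanda := PySem.List.pyGetD DEMANDAS intervalo 0
    let pot0 := CAPACIDADES.sum
    let pot := (PySem.List.pyRange 0 NUM_MAQUINAS 1).foldl (fun p i =>
      (PySem.List.pyRange 0 (PySem.List.pyGetD INTERVALOS_MANUTENCAO i 0) 1).foldl (fun p k =>
        if PySem.List.pyGetD cromossomo i 0 + k = intervalo then p - PySem.List.pyGetD CAPACIDADES i 0 else p) p) pot0
    reservas ++ [pot - demanda]) []

-- ===== PORT B =====
def calcular_reserva_alt (cromossomo : List Int) : List Int :=
  let total := CAPACIDADES.sum
  let reservas := (PySem.List.pyRange 0 NUM_INTERVALOS 1).map (fun j => total - PySem.List.pyGetD DEMANDAS j 0)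
  (PySem.List.pyRange 0 NUM_MAQUINAS 1).foldl (fun rs i =>
    (PySem.List.pyRange 0 (PySem.List.pyGetD INTERVALOS_MANUTENCAO i 0) 1).foldl (fun rs k =>
      let interval := PySem.List.pyGetD cromossomo i 0 + k
      if 0 ≤ interval ∧ interval < NUM_INTERVALOS then
        PySem.List.pySetD rs interval (PySem.List.pyGetD rs interval 0 - PySem.List.pyGetD CAPACIDADES i 0)
      else rs) rs) reservas

-- ===== PRECONDITION & SPEC =====
-- Pre_ excludes lists shorter than NUM_MAQUINAS = 7, on which the Python A raises IndexError.
def Pre_calcular_reserva (cromossomo : List Int) : Prop := 7 ≤ cromossomo.length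
instance (cromossomo : List Int) : Decidable (Pre_calcular_reserva cromossomo) := by unfold Pre_calcular_reserva; infer_instance
def pvWitness_calcular_reserva : List Int := [0, 1, 2, 3, 0, 1, 2]

def Spec_calcular_reserva (cromossomo : List Int) (out : List Int) : Prop := out = calcular_reserva_alt cromossomo
instance (cromossomo : List Int) (out : List Int) : Decidable (Spec_calcular_reserva cromossomo out) := by unfold Spec_calcular_reserva; infer_instance

-- ===== CLAIM (what is proved, stated in full; the proofs are below) =====
def Claim_equal_calcular_reserva : Prop := ∀ (cromossomo : List Int), Dom_calcular_reserva cromossomo → Pre_calcular_reserva cromossomo → Spec_calcular_reserva cromossomo (calcular_reserva cromossomo)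

-- ===== LEMMAS AND PROOFS =====

-- one conditional scatter step of B, expressed component-wise
theorem scatter_step (r0 r1 r2 r3 t cap : Int) :
    (if 0 ≤ t ∧ t < 4 then
       PySem.List.pySetD [r0,r1,r2,r3] t (PySem.List.pyGetD [r0,r1,r2,r3] t 0 - cap)
     else [r0,r1,r2,r3])
    = [r0 - (if t = 0 then cap else 0), r1 - (if t = 1 then cap else 0),
       r2 - (if t = 2 then cap else 0), r3 - (if t = 3 then cap else 0)] := by
  by_cases h : 0 ≤ t ∧ t < 4
  · have : t = 0 ∨ t = 1 ∨ t = 2 ∨ t = 3 := by omega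
    rcases this with rfl | rfl | rfl | rfl <;>
      simp [PySem.List.pySetD, PySem.List.pySet?, PySem.List.pyGetD, PySem.List.pyGet?, PySem.List.pyIdx?]
  · have h0 : t ≠ 0 := by omega
    have h1 : t ≠ 1 := by omega
    have h2 : t ≠ 2 := by omega
    have h3 : t ≠ 3 := by omega
    simp [h, h0, h1, h2, h3]

-- turn A's conditional subtraction into subtraction of a conditional atom
theorem subIte' (c : Prop) [Decidable c] (p cap : Int) :
    (if c then p - cap else p) = p - (if c then cap else 0) := by
  split_ifs <;> simp

-- ===== VERDICT (by name: the statement is the Claim_ definition above) =====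

theorem calcular_reserva_spec : Claim_equal_calcular_reserva := by
  intro cromossomo _ hpre
  unfold Pre_calcular_reserva at hpre
  match cromossomo, hpre with
  | c0 :: c1 :: c2 :: c3 :: c4 :: c5 :: c6 :: rest, _ =>
    show Spec_calcular_reserva _ _
    unfold Spec_calcular_reserva calcular_reserva calcular_reserva_alt
    unfold NUM_MAQUINAS NUM_INTERVALOS CAPACIDADES INTERVALOS_MANUTENCAO DEMANDAS
    rw [show PySem.List.pyRange 0 4 1 = [0,1,2,3] by decide,
        show PySem.List.pyRange 0 7 1 = [0,1,2,3,4,5,6] by decide]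
    simp only [List.foldl, List.map, PySem.List.pyGetD_ofNat', List.getD,
      List.getElem?_cons_zero, List.getElem?_cons_succ, Option.getD_some,
      show PySem.List.pyRange 0 2 1 = [0, 1] from by decide,
      show PySem.List.pyRange 0 1 1 = [0] from by decide,
      scatter_step, subIte']
    norm_num
    exact ⟨by ring, by ring, by ring, by ring⟩
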